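-- pv_equiv track=rewrite | github.com/iKostanOrg/codewars | kyu_6/numericals_of_string/numericals.py | numericals
-- ===== SOURCE A (Python) =====
-- def numericals(s: str) -> str:
--     """
--     For each symbol in the string if it's the
--     first character occurrence, replace it with
--     a '1', else replace it with the amount of
--     times you've already seen it.
--     :param s:
--     :return:
--     """
--     char_dict: dict = {}
--     result: str = ''
--
--     for char in s:
--         if char in char_dict:
--             char_dict[char] += 1
--         else:
--             char_dict[char] = 1
--         result += str(char_dict[char])
--
--     return result
-- ===== SOURCE B (Python) =====
-- # One scatter pass per distinct character instead of a running dict counter.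
-- def numericals(s: str) -> str:
--     res = [''] * len(s)
--     for c in set(s):
--         k = 0
--         for i, ch in enumerate(s):
--             if ch == c:
--                 k += 1
--                 res[i] = str(k)
--     return ''.join(res)
-- ===== Notes on version B (the rewrite author's own statement) =====
-- stated objective: alternative
-- what changed: Replaces the single running dict-counter pass with one scatter pass per distinct character: for each c in set(s), B numbers c's occurrences left to right and writes them into a preallocated result list, then joins it.
import Mathlib
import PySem

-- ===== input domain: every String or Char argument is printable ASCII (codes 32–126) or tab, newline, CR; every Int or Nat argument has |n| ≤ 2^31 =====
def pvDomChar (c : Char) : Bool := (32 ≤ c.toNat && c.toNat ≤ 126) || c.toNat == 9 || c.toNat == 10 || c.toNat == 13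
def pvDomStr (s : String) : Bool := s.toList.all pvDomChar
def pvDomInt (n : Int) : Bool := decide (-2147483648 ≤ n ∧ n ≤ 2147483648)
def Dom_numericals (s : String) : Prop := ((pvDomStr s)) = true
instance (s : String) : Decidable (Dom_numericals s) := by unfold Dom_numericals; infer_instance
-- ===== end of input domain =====

-- B replaces A's single running dict-counter pass by one scatter pass per distinct character
-- (number each character's occurrences left to right into a preallocated result list).

-- ===== PORT A =====
def numericals (s : String) : String :=
  String.ofList
    (s.toList.foldl
      (fun (st : PySem.Dict Char Int × List Char) ch =>
        let d := if st.1.contains ch then st.1.modify ch 0 (· + 1) else st.1.insert ch 1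
        (d, st.2 ++ PySem.Int.toChars (d.getD ch 0)))
      (PySem.Dict.empty, [])).2

-- ===== PORT B =====
-- res[i] = str(k) is ported as List.set at index q.1.toNat: exact, because enumerate
-- indices are always ≥ 0 and < len(s), where Python's res[i] assignment is total.
def numericals_alt (s : String) : String :=
  String.ofList
    (((PySem.Set.ofList s.toList).foldl
      (fun r c =>
        ((PySem.List.enumerate s.toList 0).foldl
          (fun (st : Int × List (List Char)) q =>
            if q.2 == c then
              (st.1 + 1, st.2.set q.1.toNat (PySem.Int.toChars (st.1 + 1)))
            else st)
          (0, r)).2)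
      (List.replicate s.toList.length [])).flatten)

-- ===== PRECONDITION & SPEC =====
def Spec_numericals (s : String) (out : String) : Prop := out = numericals_alt s
instance (s : String) (out : String) : Decidable (Spec_numericals s out) := by unfold Spec_numericals; infer_instance

-- ===== CLAIM (what is proved, stated in full; the proofs are below) =====
def Claim_equal_numericals : Prop := ∀ (s : String), Dom_numericals s → Spec_numericals s (numericals s)

-- ===== LEMMAS AND PROOFS =====

-- common specification: output chars still to produce, when the characters p have been processed
def runCount : List Char → List Char → List Char
  | _, [] => []
  | p, c :: rest => PySem.Int.toChars ((p.count c : Int) + 1) ++ runCount (p ++ [c]) rest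

-- A's loop produces runCount
lemma loopA (cs : List Char) : ∀ (p : List Char) (d : PySem.Dict Char Int) (acc : List Char),
    (∀ c, d.getD c 0 = (p.count c : Int)) →
    (∀ c, d.contains c = true ↔ c ∈ p) →
    (cs.foldl
      (fun (st : PySem.Dict Char Int × List Char) ch =>
        let d := if st.1.contains ch then st.1.modify ch 0 (· + 1) else st.1.insert ch 1
        (d, st.2 ++ PySem.Int.toChars (d.getD ch 0)))
      (d, acc)).2 = acc ++ runCount p cs := by
  induction cs with
  | nil => intro p d acc _ _; simp [runCount]
  | cons ch rest ih =>
    intro p d acc hgetD hcont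
    simp only [List.foldl_cons]
    by_cases h : d.contains ch = true
    · simp only [h, if_true]
      refine (ih (p ++ [ch]) (d.modify ch 0 (· + 1))
          (acc ++ PySem.Int.toChars ((d.modify ch 0 (· + 1)).getD ch 0)) ?_ ?_).trans ?_
      · intro c
        rw [PySem.Dict.getD_modify]
        by_cases hc : c = ch
        · subst hc; simp [hgetD c]
        · simp [hc, hgetD c, List.count_append, Ne.symm hc]
      · intro c
        rw [PySem.Dict.contains_modify]
        simp only [List.mem_append, List.mem_singleton, Bool.or_eq_true, beq_iff_eq]
        rw [← hcont c]; tauto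
      · rw [PySem.Dict.getD_modify_self, hgetD ch, runCount, List.append_assoc]
    · have hch : ch ∉ p := fun hm => h ((hcont ch).2 hm)
      rw [Bool.not_eq_true] at h
      simp only [h, Bool.false_eq_true, if_false]
      refine (ih (p ++ [ch]) (d.insert ch 1)
          (acc ++ PySem.Int.toChars ((d.insert ch 1).getD ch 0)) ?_ ?_).trans ?_
      · intro c
        rw [PySem.Dict.getD_insert]
        by_cases hc : c = ch
        · subst hc; simp [List.count_eq_zero.2 hch]
        · simp [hc, hgetD c, List.count_append, Ne.symm hc]
      · intro c
        rw [PySem.Dict.contains_insert]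
        simp only [List.mem_append, List.mem_singleton, Bool.or_eq_true, beq_iff_eq]
        rw [← hcont c]; tauto
      · rw [PySem.Dict.getD_insert_self, runCount, List.append_assoc,
          List.count_eq_zero.2 hch]
        norm_num

-- the inclusive-prefix-count map produces runCount
lemma mapRun (cs : List Char) : ∀ (p : List Char),
    ((PySem.List.enumerate cs (p.length : Int)).map
      (fun q => PySem.Int.toChars
        ((List.count q.2 ((p ++ cs).take (q.1.toNat + 1)) : Nat) : Int))).flatten
      = runCount p cs := by
  induction cs with
  | nil => intro p; simp [runCount, PySem.List.enumerate_nil]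
  | cons c rest ih =>
    intro p
    rw [PySem.List.enumerate_cons]
    simp only [List.map_cons, List.flatten_cons]
    have h1 : ((p.length : Int)).toNat + 1 = p.length + 1 := by omega
    have h2 : (p ++ c :: rest).take (p.length + 1) = p ++ [c] := by
      simp [List.take_append]
    have htail := ih (p ++ [c])
    simp only [List.length_append, List.length_singleton, Nat.cast_add, Nat.cast_one,
      List.append_assoc, List.singleton_append] at htail
    rw [h1, h2, htail, runCount, List.count_append, List.count_singleton]
    simp

-- B's inner loop, as a structural scatter
def scat : List (List Char) → Nat → List Char → Char → Int → List (List Char)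
  | r, _, [], _, _ => r
  | r, j, ch :: rest, c, k =>
      if ch == c then scat (r.set j (PySem.Int.toChars (k + 1))) (j + 1) rest c (k + 1)
      else scat r (j + 1) rest c k

lemma enumerate_getElem? (cs : List Char) : ∀ (s : Int) (i : Nat),
    (PySem.List.enumerate cs s)[i]? = cs[i]?.map (fun c => (s + i, c)) := by
  induction cs with
  | nil => intro s i; simp [PySem.List.enumerate_nil]
  | cons c rest ih =>
    intro s i
    rw [PySem.List.enumerate_cons]
    cases i with
    | zero => simp
    | succ m => simp [ih, Nat.cast_add]; ring_nf

lemma inner_eq (c : Char) (rest : List Char) : ∀ (j : Nat) (k : Int) (r : List (List Char)),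
    ((PySem.List.enumerate rest (j : Int)).foldl
      (fun (st : Int × List (List Char)) q =>
        if q.2 == c then
          (st.1 + 1, st.2.set q.1.toNat (PySem.Int.toChars (st.1 + 1)))
        else st)
      (k, r)).2 = scat r j rest c k := by
  induction rest with
  | nil => intro j k r; simp [PySem.List.enumerate_nil, scat]
  | cons ch rest ih =>
    intro j k r
    rw [PySem.List.enumerate_cons, List.foldl_cons, scat]
    have hcast : ((j : Int) + 1) = ((j + 1 : Nat) : Int) := by push_cast; ring
    cases hb : (ch == c) with
    | true =>
      simp only [if_true, Int.toNat_natCast, hcast, ih]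
    | false =>
      simp only [Bool.false_eq_true, if_false, hcast, ih]

lemma scat_length (rest : List Char) : ∀ (r : List (List Char)) (j : Nat) (c : Char) (k : Int),
    (scat r j rest c k).length = r.length := by
  induction rest with
  | nil => intro r j c k; simp [scat]
  | cons ch rest ih =>
    intro r j c k
    rw [scat]
    by_cases h : (ch == c) = true <;> simp [h, ih]

lemma scat_get_lt (rest : List Char) : ∀ (r : List (List Char)) (j : Nat) (c : Char) (k : Int)
    (i : Nat), i < j → (scat r j rest c k)[i]? = r[i]? := by
  induction rest with
  | nil => intro r j c k i _; simp [scat]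
  | cons ch rest ih =>
    intro r j c k i hij
    rw [scat]
    cases hb : (ch == c) with
    | true =>
      simp only [if_true]
      rw [ih _ _ _ _ _ (by omega), List.getElem?_set_ne (by omega)]
    | false =>
      simp only [Bool.false_eq_true, if_false]
      rw [ih _ _ _ _ _ (by omega)]

lemma scat_get (rest : List Char) : ∀ (r : List (List Char)) (j : Nat) (c : Char) (k : Int)
    (m : Nat), m < rest.length → j + m < r.length →
    (scat r j rest c k)[j + m]? =
      if rest[m]? = some c
      then some (PySem.Int.toChars (k + (List.count c (rest.take (m + 1)) : Int)))
      else r[j + m]? := by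
  induction rest with
  | nil => intro r j c k m hm _; simp at hm
  | cons ch rest ih =>
    intro r j c k m hm hr
    rw [scat]
    cases m with
    | zero =>
      by_cases h : ch = c
      · subst h
        simp only [BEq.rfl, if_true, Nat.add_zero]
        rw [scat_get_lt rest _ _ _ _ j (by omega), List.getElem?_set_self (by omega)]
        simp
      · have hb : (ch == c) = false := by simp [h]
        simp only [hb, Bool.false_eq_true, if_false, Nat.add_zero]
        rw [scat_get_lt rest _ _ _ _ j (by omega)]
        simp [h]
    | succ m' =>
      have hadd : j + (m' + 1) = (j + 1) + m' := by omega
      by_cases h : ch = c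
      · subst h
        simp only [BEq.rfl, if_true]
        rw [hadd, ih _ _ _ _ _ (by simpa using hm) (by simp; omega)]
        by_cases hm2 : rest[m']? = some ch
        · simp only [hm2, if_true, List.getElem?_cons_succ, List.take_succ_cons,
            List.count_cons_self]
          push_cast; ring_nf
        · simp only [hm2, if_false, List.getElem?_cons_succ]
          rw [List.getElem?_set_ne (by omega)]
      · have hb : (ch == c) = false := by simp [h]
        simp only [hb, Bool.false_eq_true, if_false]
        rw [hadd, ih _ _ _ _ _ (by simpa using hm) (by omega)]
        simp only [List.getElem?_cons_succ, List.take_succ_cons]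
        simp [h]

-- one whole pass over cs writes exactly the positions of c
lemma pass_get (cs : List Char) (r : List (List Char)) (c : Char) (i : Nat)
    (hi : i < cs.length) (hr : r.length = cs.length) :
    (scat r 0 cs c 0)[i]? =
      if cs[i]? = some c
      then some (PySem.Int.toChars ((List.count c (cs.take (i + 1)) : Nat) : Int))
      else r[i]? := by
  have := scat_get cs r 0 c 0 i hi (by omega)
  simpa using this

-- the outer loop over any character list cls
lemma outer (cs : List Char) : ∀ (cls : List Char) (r : List (List Char)),
    r.length = cs.length →
    (cls.foldl (fun r c => scat r 0 cs c 0) r).length = cs.length ∧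
    ∀ (i : Nat) (ci : Char), cs[i]? = some ci →
      (cls.foldl (fun r c => scat r 0 cs c 0) r)[i]? =
        if ci ∈ cls
        then some (PySem.Int.toChars ((List.count ci (cs.take (i + 1)) : Nat) : Int))
        else r[i]? := by
  intro cls
  induction cls with
  | nil => intro r hr; exact ⟨hr, by intro i ci h; simp⟩
  | cons c cls ih =>
    intro r hr
    have hr1 : (scat r 0 cs c 0).length = cs.length := by rw [scat_length]; exact hr
    obtain ⟨hlen, hget⟩ := ih (scat r 0 cs c 0) hr1
    refine ⟨by simpa using hlen, ?_⟩
    intro i ci hci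
    have hi : i < cs.length := by
      by_contra hbig
      rw [List.getElem?_eq_none (by omega)] at hci
      simp at hci
    rw [List.foldl_cons, hget i ci hci]
    by_cases hmem : ci ∈ cls
    · simp [hmem]
    · rw [if_neg hmem, pass_get cs r c i hi hr, hci]
      by_cases hc : ci = c
      · subst hc; simp
      · have : ¬ (some ci = some c) := by simp [hc]
        simp [this, hc, hmem]

-- ===== VERDICT (by name: the statement is the Claim_ definition above) =====
theorem numericals_spec : Claim_equal_numericals := by
  intro s _
  unfold Spec_numericals numericals numericals_alt
  rw [loopA s.toList [] PySem.Dict.empty [] (by simp) (by simp)]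
  rw [List.nil_append]
  have hfun : (fun (r : List (List Char)) c =>
      ((PySem.List.enumerate s.toList 0).foldl
        (fun (st : Int × List (List Char)) q =>
          if q.2 == c then
            (st.1 + 1, st.2.set q.1.toNat (PySem.Int.toChars (st.1 + 1)))
          else st)
        (0, r)).2) = fun r c => scat r 0 s.toList c 0 := by
    funext r c
    have h := inner_eq c s.toList 0 0 r
    simpa using h
  rw [hfun]
  obtain ⟨hlen, hget⟩ := outer s.toList (PySem.Set.ofList s.toList)
    (List.replicate s.toList.length []) (by simp)
  have hres : (PySem.Set.ofList s.toList).foldl (fun r c => scat r 0 s.toList c 0)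
      (List.replicate s.toList.length [])
      = (PySem.List.enumerate s.toList 0).map
        (fun q => PySem.Int.toChars
          ((List.count q.2 (s.toList.take (q.1.toNat + 1)) : Nat) : Int)) := by
    apply List.ext_getElem?
    intro i
    have henum := enumerate_getElem? s.toList 0 i
    cases hci : s.toList[i]? with
    | none =>
      have hi : s.toList.length ≤ i := by
        by_contra hlt
        rw [List.getElem?_eq_getElem (by omega)] at hci
        simp at hci
      rw [List.getElem?_eq_none (by omega), List.getElem?_eq_none (by simpa using hi)]
    | some ci =>
      have hmem : ci ∈ PySem.Set.ofList s.toList := by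
        rw [PySem.Set.mem_ofList]
        exact List.mem_of_getElem? hci
      rw [hget i ci hci, if_pos hmem, List.getElem?_map, henum, hci]
      simp
  rw [hres]
  have hmap := mapRun s.toList []
  simp only [List.length_nil, Nat.cast_zero, List.nil_append] at hmap
  rw [hmap]
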